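-- pv_equiv track=rewrite | github.com/XiaoMi/kaldi-onnx | converter/component.py | __check_for_newline
-- ===== SOURCE A (Python) =====
-- from typing import Dict, Optional, Set, TextIO, Tuple
--
-- def __check_for_newline(line: str, pos: int) -> Tuple[bool, int]:
--   """Check if line is newline.
--
--   Args:
--     line: line.
--     pos: current position.
--
--   Returns:
--     bool and current position.
--   """
--   assert isinstance(line, str) and isinstance(pos, int)
--   assert pos >= 0
--
--   saw_newline = False
--   while pos < len(line) and line[pos].isspace():
--     if line[pos] == '\n':
--       saw_newline = True
--     pos += 1
--   return saw_newline, pos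
-- ===== SOURCE B (Python) =====
-- def __check_for_newline(line, pos):
--   """Check if line is newline (lstrip-based: compute the whitespace run as a
--   prefix via str.lstrip, then test newline membership separately)."""
--   assert isinstance(line, str) and isinstance(pos, int)
--   assert pos >= 0
--
--   prefix = line[pos:]
--   stripped = prefix.lstrip()
--   ws = prefix[:len(prefix) - len(stripped)]
--   return '\n' in ws, pos + len(ws)
-- ===== Notes on version B (the rewrite author's own statement) =====
-- stated objective: idiomatic
-- what changed: Replaces the fused character-by-character scan-and-detect while loop with a library-based prefix computation: str.lstrip yields the whitespace run in one call, and the newline flag becomes a separate membership test on that run.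
import Mathlib
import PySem

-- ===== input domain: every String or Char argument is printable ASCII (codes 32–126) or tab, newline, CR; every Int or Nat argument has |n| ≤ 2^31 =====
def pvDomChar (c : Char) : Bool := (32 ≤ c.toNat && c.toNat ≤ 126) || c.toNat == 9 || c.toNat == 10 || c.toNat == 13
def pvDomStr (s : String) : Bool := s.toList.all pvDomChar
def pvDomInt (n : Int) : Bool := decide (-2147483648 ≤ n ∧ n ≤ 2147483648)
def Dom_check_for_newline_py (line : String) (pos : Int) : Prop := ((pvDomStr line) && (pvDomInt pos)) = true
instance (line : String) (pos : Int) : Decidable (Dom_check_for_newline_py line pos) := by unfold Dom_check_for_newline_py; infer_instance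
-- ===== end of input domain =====

-- B replaces A's fused scan-and-detect while loop by a library-based prefix computation
-- (lstrip gives the whitespace run, newline detection is a separate membership test); objective: idiomatic.


-- ===== PORT A =====
-- the while loop: scan forward while whitespace, flagging '\n' as it passes
def cfnLoop (cs : List Char) (pos : Nat) (saw : Bool) : Bool × Nat :=
  if h : pos < cs.length then
    if PySem.Chars.isspace cs[pos] then
      cfnLoop cs (pos + 1) (if cs[pos] == '\n' then true else saw)
    else (saw, pos)
  else (saw, pos)
termination_by cs.length - pos

def check_for_newline_py (line : String) (pos : Int) : Bool × Int :=
  -- Python asserts pos >= 0 (raises below 0: excluded by Pre_); guard only makes the port total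
  if pos < 0 then (false, pos)
  else
    let r := cfnLoop line.toList pos.toNat false
    (r.1, (r.2 : Int))

-- ===== PORT B =====
def check_for_newline_py_alt (line : String) (pos : Int) : Bool × Int :=
  if pos < 0 then (false, pos)   -- same assert guard; below Pre_ nothing is claimed
  else
    let pre := PySem.Str.slice line (some pos) none
    let stripped := PySem.Str.lstrip pre
    let ws := PySem.Str.slice pre none (some (PySem.Str.len pre - PySem.Str.len stripped))
    (PySem.Str.isIn "\n" ws, pos + PySem.Str.len ws)

-- ===== PRECONDITION & SPEC =====
-- Pre_: Python A raises AssertionError for pos < 0; it returns on every other input.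
def Pre_check_for_newline_py (line : String) (pos : Int) : Prop := 0 ≤ pos
instance (line : String) (pos : Int) : Decidable (Pre_check_for_newline_py line pos) := by unfold Pre_check_for_newline_py; infer_instance
def pvWitness_check_for_newline_py : String × Int := (" \n x", 0)

def Spec_check_for_newline_py (line : String) (pos : Int) (out : Bool × Int) : Prop := out = check_for_newline_py_alt line pos
instance (line : String) (pos : Int) (out : Bool × Int) : Decidable (Spec_check_for_newline_py line pos out) := by unfold Spec_check_for_newline_py; infer_instance

-- ===== CLAIM (what is proved, stated in full; the proofs are below) =====
def Claim_equal_check_for_newline_py : Prop := ∀ (line : String) (pos : Int), Dom_check_for_newline_py line pos → Pre_check_for_newline_py line pos → Spec_check_for_newline_py line pos (check_for_newline_py line pos)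

-- ===== LEMMAS AND PROOFS =====

-- A's loop computes: newline-membership and length of the whitespace run from pos
theorem cfnLoop_eq (cs : List Char) (pos : Nat) (saw : Bool) :
    cfnLoop cs pos saw =
      (saw || ((cs.drop pos).takeWhile PySem.Chars.isspace).contains '\n',
       pos + ((cs.drop pos).takeWhile PySem.Chars.isspace).length) := by
  by_cases h : pos < cs.length
  · have hd : cs.drop pos = cs[pos] :: cs.drop (pos + 1) := List.drop_eq_getElem_cons h
    by_cases hs : PySem.Chars.isspace cs[pos] = true
    · rw [cfnLoop]
      simp only [h, dif_pos, hs, if_pos]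
      rw [cfnLoop_eq cs (pos + 1)]
      rw [hd]
      simp only [List.takeWhile_cons, hs, if_pos, List.contains_cons, List.length_cons]
      refine Prod.ext ?_ ?_
      · by_cases hc : cs[pos] = '\n'
        · cases saw <;> simp [hc]
        · have hc' : ¬ ('\n' = cs[pos]) := fun h => hc h.symm
          cases saw <;> simp [hc, hc']
      · simp only
        omega
    · rw [cfnLoop]
      simp only [h, dif_pos, hs]
      rw [hd]
      simp only [List.takeWhile_cons, hs]
      simp
  · have hd : cs.drop pos = [] := List.drop_eq_nil_of_le (by omega)
    rw [cfnLoop]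
    simp [h, hd]
termination_by cs.length - pos

-- take (length of the takeWhile prefix) recovers the takeWhile prefix
theorem take_length_takeWhile {α : Type} (p : α → Bool) (l : List α) :
    l.take (l.takeWhile p).length = l.takeWhile p := by
  calc l.take (l.takeWhile p).length
      = (l.takeWhile p ++ l.dropWhile p).take (l.takeWhile p).length := by
        rw [List.takeWhile_append_dropWhile]
    _ = l.takeWhile p := List.take_left

-- membership of '\n' in a string as Bool equality with List.contains
theorem isIn_newline (ws : String) :
    PySem.Str.isIn "\n" ws = ws.toList.contains '\n' := by
  have h1 : "\n".toList = ['\n'] := by decide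
  rw [Bool.eq_iff_iff, PySem.Str.isIn_iff_infix, h1, List.singleton_infix_iff]
  simp

-- ===== VERDICT (by name: the statement is the Claim_ definition above) =====
theorem check_for_newline_py_spec : Claim_equal_check_for_newline_py := by
  intro line pos _ hpre
  unfold Spec_check_for_newline_py check_for_newline_py check_for_newline_py_alt
  have hnn : ¬ pos < 0 := by exact not_lt.mpr hpre
  simp only [hnn, if_false]
  set t : List Char := line.toList.drop pos.toNat with ht
  set w : List Char := t.takeWhile PySem.Chars.isspace with hw
  -- characterize B's pieces
  have hpre' : (PySem.Str.slice line (some pos) none).toList = t := by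
    rw [PySem.Str.toList_slice]
    exact PySem.List.slice_from _ hpre
  have hstr : (PySem.Str.lstrip (PySem.Str.slice line (some pos) none)).toList
      = t.dropWhile PySem.Chars.isspace := by
    rw [PySem.Str.toList_lstrip, hpre']
    rfl
  have hlen : PySem.Str.len (PySem.Str.slice line (some pos) none)
      - PySem.Str.len (PySem.Str.lstrip (PySem.Str.slice line (some pos) none))
      = (w.length : Int) := by
    rw [PySem.Str.len_eq, PySem.Str.len_eq, hpre', hstr]
    have h2 : (t.takeWhile PySem.Chars.isspace).length + (t.dropWhile PySem.Chars.isspace).length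
        = t.length := by rw [← List.length_append, List.takeWhile_append_dropWhile]
    have hw2 : w.length = (t.takeWhile PySem.Chars.isspace).length := by rw [hw]
    omega
  have hws : (PySem.Str.slice (PySem.Str.slice line (some pos) none) none
      (some (PySem.Str.len (PySem.Str.slice line (some pos) none)
        - PySem.Str.len (PySem.Str.lstrip (PySem.Str.slice line (some pos) none))))).toList = w := by
    have h0 : (0 : Int) ≤ (w.length : Int) := by positivity
    rw [PySem.Str.toList_slice, hlen, hpre']
    show PySem.List.slice t none (some (w.length : Int)) = w
    rw [PySem.List.slice_to _ h0]
    simpa using take_length_takeWhile PySem.Chars.isspace t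
  rw [cfnLoop_eq]
  have hp0 : (0 : Int) ≤ pos := hpre
  refine Prod.ext ?_ ?_
  · simp only
    rw [isIn_newline, hws]
    simp only [Bool.false_or]
    rw [← ht, ← hw]
  · simp only
    rw [PySem.Str.len_eq, hws]
    rw [← ht, ← hw]
    omega
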